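-- pv_equiv track=rewrite | github.com/Nihiru/Python | Hackerrank/sea-level.py | countingValley
-- ===== SOURCE A (Python) =====
-- def countingValley(n, s):
--     sl = list(s)
--     valley_count = 0
--     level = 0
--     for i in sl:
--         if i == 'U':
--             valley_count += 1
--         elif i == 'D':
--             valley_count -= 1
--             # number of times 'x' has traversed through the valley
--             if valley_count == -1:
--                 level += 1
--     return level
-- ===== SOURCE B (Python) =====
-- def countingValley(n, s):
--     deltas = [1 if c == 'U' else (-1 if c == 'D' else 0) for c in s]
--     alts = []
--     a = 0
--     for d in deltas:
--         a += d
--         alts.append(a)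
--     prev = 0
--     count = 0
--     for a in alts:
--         if prev == 0 and a == -1:
--             count += 1
--         prev = a
--     return count
-- ===== Notes on version B (the rewrite author's own statement) =====
-- stated objective: alternative
-- what changed: B builds the full altitude profile (step deltas accumulated) and then counts 0→-1 transitions in a second scan, instead of A's single fold with an in-loop conditional counter.
import Mathlib
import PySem

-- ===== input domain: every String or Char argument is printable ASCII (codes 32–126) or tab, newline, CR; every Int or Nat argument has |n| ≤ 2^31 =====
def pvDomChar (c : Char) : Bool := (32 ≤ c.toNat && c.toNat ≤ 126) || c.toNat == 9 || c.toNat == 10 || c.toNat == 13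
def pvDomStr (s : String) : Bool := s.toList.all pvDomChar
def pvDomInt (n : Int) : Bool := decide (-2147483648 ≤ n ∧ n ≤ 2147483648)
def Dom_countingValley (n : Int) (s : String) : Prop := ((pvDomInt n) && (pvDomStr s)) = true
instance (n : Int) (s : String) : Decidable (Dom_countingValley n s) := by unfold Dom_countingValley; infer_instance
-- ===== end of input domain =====

-- B replaces A's single fold (counter updated inside the 'D' branch) by a two-pass
-- table-then-scan decomposition: build the altitude profile, then count 0→-1 transitions.

-- ===== PORT A =====
-- A's loop over the characters carrying (valley_count, level)
def cvLoopA : List Char → Int → Int → Int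
  | [], _, level => level
  | c :: cs, vc, level =>
      if c = 'U' then cvLoopA cs (vc + 1) level
      else if c = 'D' then
        cvLoopA cs (vc - 1) (if vc - 1 = -1 then level + 1 else level)
      else cvLoopA cs vc level

def countingValley (_n : Int) (s : String) : Int :=
  cvLoopA s.toList 0 0

-- ===== PORT B =====
def cvDelta (c : Char) : Int := if c = 'U' then 1 else if c = 'D' then -1 else 0

-- first pass: accumulate deltas into the altitude profile
def cvProfile : Int → List Int → List Int
  | _, [] => []
  | a, d :: ds => (a + d) :: cvProfile (a + d) ds

-- second pass: count indices where the previous altitude is 0 and the current is -1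
def cvCount : Int → Int → List Int → Int
  | _, count, [] => count
  | prev, count, a :: as_ =>
      cvCount a (if prev = 0 ∧ a = -1 then count + 1 else count) as_

def countingValley_alt (_n : Int) (s : String) : Int :=
  cvCount 0 0 (cvProfile 0 (s.toList.map cvDelta))

-- ===== PRECONDITION & SPEC =====
def Spec_countingValley (n : Int) (s : String) (out : Int) : Prop := out = countingValley_alt n s
instance (n : Int) (s : String) (out : Int) : Decidable (Spec_countingValley n s out) := by unfold Spec_countingValley; infer_instance

-- ===== CLAIM (what is proved, stated in full; the proofs are below) =====
def Claim_equal_countingValley : Prop := ∀ (n : Int) (s : String), Dom_countingValley n s → Spec_countingValley n s (countingValley n s)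

-- ===== LEMMAS AND PROOFS =====
theorem cvLoopA_U (cs : List Char) (v l : Int) :
    cvLoopA ('U' :: cs) v l = cvLoopA cs (v + 1) l := by simp [cvLoopA]

theorem cvLoopA_D (cs : List Char) (v l : Int) :
    cvLoopA ('D' :: cs) v l = cvLoopA cs (v - 1) (if v - 1 = -1 then l + 1 else l) := by
  simp [cvLoopA]

theorem cvLoopA_other (c : Char) (cs : List Char) (v l : Int) (hU : c ≠ 'U') (hD : c ≠ 'D') :
    cvLoopA (c :: cs) v l = cvLoopA cs v l := by simp [cvLoopA, hU, hD]

theorem cvDelta_U : cvDelta 'U' = 1 := by decide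
theorem cvDelta_D : cvDelta 'D' = -1 := by decide
theorem cvDelta_other (c : Char) (hU : c ≠ 'U') (hD : c ≠ 'D') : cvDelta c = 0 := by
  simp [cvDelta, hU, hD]

theorem cvCount_shift (xs : List Int) : ∀ (p k : Int), cvCount p k xs = k + cvCount p 0 xs := by
  induction xs with
  | nil => intro p k; simp [cvCount]
  | cons a as ih =>
    intro p k
    simp only [cvCount]
    rw [ih, ih a (if p = 0 ∧ a = -1 then 0 + 1 else 0)]
    split_ifs <;> omega

theorem cvLoop_eq (cs : List Char) : ∀ (v l : Int),
    cvLoopA cs v l = l + cvCount v 0 (cvProfile v (cs.map cvDelta)) := by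
  induction cs with
  | nil => intro v l; simp [cvLoopA, cvProfile, cvCount]
  | cons c cs ih =>
    intro v l
    by_cases hU : c = 'U'
    · subst hU
      rw [cvLoopA_U, List.map_cons, cvDelta_U, cvProfile, cvCount, ih,
        if_neg (by rintro ⟨h0, h1⟩; omega : ¬ (v = 0 ∧ v + 1 = -1))]
    · by_cases hD : c = 'D'
      · subst hD
        rw [cvLoopA_D, List.map_cons, cvDelta_D, cvProfile, cvCount, ih,
          (by omega : v + -1 = v - 1)]
        by_cases h0 : v = 0
        · rw [if_pos (by omega : v - 1 = -1), if_pos ⟨h0, by omega⟩]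
          have := cvCount_shift (cvProfile (v - 1) (cs.map cvDelta)) (v - 1) (0 + 1)
          omega
        · rw [if_neg (by omega : ¬ v - 1 = -1), if_neg (by rintro ⟨h, _⟩; exact h0 h)]
      · rw [cvLoopA_other c cs v l hU hD, List.map_cons, cvDelta_other c hU hD,
          cvProfile, cvCount, ih, (by omega : v + 0 = v),
          if_neg (by rintro ⟨h0, h1⟩; omega : ¬ (v = 0 ∧ v = -1))]

-- ===== VERDICT (by name: the statement is the Claim_ definition above) =====
theorem countingValley_spec : Claim_equal_countingValley := by
  intro n s _
  unfold Spec_countingValley countingValley countingValley_alt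
  rw [cvLoop_eq]
  omega
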